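-- pv_equiv track=rewrite | github.com/rafaelperazzo/programacao-web | moodledata/vpl_data/46/usersdata/125/19408/submittedfiles/funcoes1.py | crescente
-- ===== SOURCE A (Python) =====
-- def crescente (lista):
--     cont=0
--     for i in range(0,len(lista)-1,1):
--         if lista[i]<lista[i+1]:
--             cont=cont+1
--
--     if cont!=0:
--         return False
--     else:
--         return True
-- ===== SOURCE B (Python) =====
-- def crescente(lista):
--     return lista == sorted(lista, reverse=True)
-- ===== Notes on version B (the rewrite author's own statement) =====
-- stated objective: simpler
-- what changed: Replaces A's indexed adjacent-pair counting loop with a sort-then-compare: the list is non-increasing iff it equals its descending-sorted copy.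
import Mathlib
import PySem

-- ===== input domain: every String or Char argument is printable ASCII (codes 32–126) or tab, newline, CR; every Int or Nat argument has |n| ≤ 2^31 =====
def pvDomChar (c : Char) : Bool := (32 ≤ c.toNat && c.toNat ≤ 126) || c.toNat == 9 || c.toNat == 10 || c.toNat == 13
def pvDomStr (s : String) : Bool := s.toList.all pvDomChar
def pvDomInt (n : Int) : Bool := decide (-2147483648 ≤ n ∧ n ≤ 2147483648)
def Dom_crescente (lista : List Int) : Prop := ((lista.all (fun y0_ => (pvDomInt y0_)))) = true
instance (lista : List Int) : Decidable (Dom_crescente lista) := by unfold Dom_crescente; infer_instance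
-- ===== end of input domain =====

-- B replaces A's adjacent-pair counting loop with 'lista == sorted(lista, reverse=True)' (simpler decomposition, same result).

-- ===== PORT A =====
-- counts ascending adjacent pairs over range(0, len-1, 1), then returns False iff the count is nonzero
def crescente (lista : List Int) : Bool :=
  let cont : Int :=
    (PySem.List.pyRange 0 ((lista.length : Int) - 1) 1).foldl
      (fun cont i =>
        if PySem.List.pyGetD lista i 0 < PySem.List.pyGetD lista (i + 1) 0 then cont + 1 else cont) 0
  if cont ≠ 0 then false else true

-- ===== PORT B =====
-- 'lista == sorted(lista, reverse=True)'
def crescente_alt (lista : List Int) : Bool :=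
  lista == PySem.List.sorted lista (fun x => x) true

-- ===== PRECONDITION & SPEC =====
def Spec_crescente (lista : List Int) (out : Bool) : Prop := out = crescente_alt lista
instance (lista : List Int) (out : Bool) : Decidable (Spec_crescente lista out) := by unfold Spec_crescente; infer_instance

-- ===== CLAIM (what is proved, stated in full; the proofs are below) =====
def Claim_equal_crescente : Prop := ∀ (lista : List Int), Dom_crescente lista → Spec_crescente lista (crescente lista)

-- ===== LEMMAS AND PROOFS =====

-- A returns true exactly when the list is pairwise non-increasing.
theorem crescente_eq_true_iff (lista : List Int) :
    crescente lista = true ↔ lista.Pairwise (fun a b => b ≤ a) := by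
  have hcount : crescente lista = true ↔
      List.countP
        (fun i => decide (PySem.List.pyGetD lista i 0 < PySem.List.pyGetD lista (i + 1) 0))
        (PySem.List.pyRange 0 ((lista.length : Int) - 1) 1) = 0 := by
    unfold crescente
    rw [show (fun (cont : Int) i =>
          if PySem.List.pyGetD lista i 0 < PySem.List.pyGetD lista (i + 1) 0 then cont + 1 else cont)
        = (fun (cont : Int) i =>
          if decide (PySem.List.pyGetD lista i 0 < PySem.List.pyGetD lista (i + 1) 0) = true
          then cont + 1 else cont) from by funext cont i; simp]
    rw [PySem.List.foldl_count_if]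
    simp only [zero_add]
    split_ifs with hc
    · simp only [false_iff]; omega
    · simp only [true_iff]; omega
  rw [hcount, List.countP_eq_zero, ← List.isChain_iff_pairwise, List.isChain_iff_getElem]
  constructor
  · intro h i hi
    have hmem : ((i : Nat) : Int) ∈ PySem.List.pyRange 0 ((lista.length : Int) - 1) 1 := by
      rw [PySem.List.mem_pyRange_one]; omega
    have hthis := h _ hmem
    rw [PySem.List.pyGetD_eq_getElem lista 0 (by omega) (by omega),
        PySem.List.pyGetD_eq_getElem lista 0 (by omega) (by omega)] at hthis
    simp only [decide_eq_true_eq, not_lt] at hthis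
    have e1 : (((i : Nat) : Int)).toNat = i := by omega
    have e2 : (((i : Nat) : Int) + 1).toNat = i + 1 := by omega
    simp only [e1, e2] at hthis
    exact hthis
  · intro h j hj
    rw [PySem.List.mem_pyRange_one] at hj
    rw [PySem.List.pyGetD_eq_getElem lista 0 (by omega) (by omega),
        PySem.List.pyGetD_eq_getElem lista 0 (by omega) (by omega)]
    simp only [decide_eq_true_eq, not_lt]
    have e : (j + 1).toNat = j.toNat + 1 := by omega
    simp only [e]
    exact h j.toNat (by omega)

theorem crescente_alt_eq_true_iff (lista : List Int) :
    crescente_alt lista = true ↔ lista.Pairwise (fun a b => b ≤ a) := by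
  unfold crescente_alt
  rw [beq_iff_eq]
  constructor
  · intro h
    conv_rhs => rw [h]
    exact PySem.List.sorted_pairwise_rev lista (fun x => x)
  · intro h
    exact (PySem.List.sorted_rev_eq_self_of_pairwise lista (fun x => x) h).symm

-- ===== VERDICT (by name: the statement is the Claim_ definition above) =====
theorem crescente_spec : Claim_equal_crescente := by
  intro lista _
  unfold Spec_crescente
  rw [Bool.eq_iff_iff, crescente_eq_true_iff, crescente_alt_eq_true_iff]
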